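-- pv_equiv track=rewrite | github.com/aminekh209/projectPFE | Back-end/service/zip_analyzer.py | _verifier_structure_unix
-- ===== SOURCE A (Python) =====
-- from typing import Dict, Any, List
--
-- def _verifier_structure_unix(structure: Dict) -> bool:
--     """
--     Verify if the UNIX directory structure is complete
--     """
--     folders = structure.get('dossiers', [])
--     required_folders = ['bin', 'lib', 'ctl']
--
--     present_folders = []
--     for folder in folders:
--         for req in required_folders:
--             if req in folder:
--                 present_folders.append(req)
--
--     # Check if we found at least 3 distinct required folders
--     return len(set(present_folders)) >= 3
-- ===== SOURCE B (Python) =====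
-- def _verifier_structure_unix(structure):
--     """
--     Verify if the UNIX directory structure is complete
--     """
--     def go(folders, missing):
--         if not missing:
--             return True
--         if not folders:
--             return False
--         head, rest = folders[0], folders[1:]
--         return go(rest, [r for r in missing if r not in head])
--     return go(list(structure.get('dossiers', [])), ['bin', 'lib', 'ctl'])
-- ===== Notes on version B (the rewrite author's own statement) =====
-- stated objective: alternative
-- what changed: B is a worklist recursion that consumes folders one at a time while shrinking the list of still-missing requirements (stopping as soon as it is empty), instead of A's nested accumulation of matched names followed by a distinct-count via len(set(...)).
import Mathlib
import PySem

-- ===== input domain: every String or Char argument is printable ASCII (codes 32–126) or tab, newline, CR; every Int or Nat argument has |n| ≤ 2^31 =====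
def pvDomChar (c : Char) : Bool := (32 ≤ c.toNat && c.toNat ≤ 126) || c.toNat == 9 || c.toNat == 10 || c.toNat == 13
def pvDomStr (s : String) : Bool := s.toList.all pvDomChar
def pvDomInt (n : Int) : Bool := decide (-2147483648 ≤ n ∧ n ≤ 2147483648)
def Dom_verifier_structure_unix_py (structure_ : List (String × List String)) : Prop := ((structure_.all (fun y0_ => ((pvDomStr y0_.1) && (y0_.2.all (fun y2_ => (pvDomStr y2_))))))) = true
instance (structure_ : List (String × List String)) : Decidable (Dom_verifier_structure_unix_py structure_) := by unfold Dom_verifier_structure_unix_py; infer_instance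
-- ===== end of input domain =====

-- B replaces A's accumulate-then-dedup-count with a worklist recursion that consumes
-- folders while shrinking the list of still-missing requirements; same result, alternative algorithm.

-- ===== PORT A =====
def verifier_structure_unix_py (structure_ : List (String × List String)) : Bool :=
  let folders := PySem.Dict.getD (PySem.Dict.ofList structure_) "dossiers" []
  let required_folders : List String := ["bin", "lib", "ctl"]
  let present_folders : List String :=
    folders.foldl (fun acc folder =>
      required_folders.foldl (fun acc2 req =>
        if PySem.Str.isIn req folder then acc2 ++ [req] else acc2) acc) []
  decide (3 ≤ (PySem.Set.ofList present_folders).length)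

-- ===== PORT B =====
-- the inner recursive helper 'go' of Source B
def pvGo : List String → List String → Bool
  | _, [] => true
  | [], _ => false
  | head :: rest, missing =>
      pvGo rest (missing.filter (fun r => !PySem.Str.isIn r head))

def verifier_structure_unix_py_alt (structure_ : List (String × List String)) : Bool :=
  pvGo (PySem.Dict.getD (PySem.Dict.ofList structure_) "dossiers" []) ["bin", "lib", "ctl"]

-- ===== PRECONDITION & SPEC =====
def Spec_verifier_structure_unix_py (structure_ : List (String × List String)) (out : Bool) : Prop := out = verifier_structure_unix_py_alt structure_
instance (structure_ : List (String × List String)) (out : Bool) : Decidable (Spec_verifier_structure_unix_py structure_ out) := by unfold Spec_verifier_structure_unix_py; infer_instance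

-- ===== CLAIM (what is proved, stated in full; the proofs are below) =====
def Claim_equal_verifier_structure_unix_py : Prop := ∀ (structure_ : List (String × List String)), Dom_verifier_structure_unix_py structure_ → Spec_verifier_structure_unix_py structure_ (verifier_structure_unix_py structure_)

-- ===== LEMMAS AND PROOFS =====

-- B's worklist recursion succeeds iff each still-missing name occurs in some remaining folder.
theorem pvGo_eq_all_any (folders : List String) :
    ∀ missing : List String,
    pvGo folders missing =
      missing.all (fun r => folders.any (fun f => PySem.Str.isIn r f)) := by
  induction folders with
  | nil =>
    intro missing
    cases missing with
    | nil => rfl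
    | cons m ms => simp [pvGo]
  | cons head rest ih =>
    intro missing
    cases missing with
    | nil => rfl
    | cons m ms =>
      rw [show pvGo (head :: rest) (m :: ms) =
          pvGo rest ((m :: ms).filter (fun r => !PySem.Str.isIn r head)) from rfl]
      rw [ih]
      have key : ∀ l : List String,
          (l.filter (fun r => !PySem.Str.isIn r head)).all
            (fun r => rest.any (fun f => PySem.Str.isIn r f)) =
          l.all (fun r => (head :: rest).any (fun f => PySem.Str.isIn r f)) := by
        intro l
        induction l with
        | nil => rfl
        | cons x xs ihx =>
          by_cases hx : PySem.Str.isIn x head = true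
          · simp only [PySem.Str.isIn] at hx
            simp [hx, List.any_cons]
          · simp only [PySem.Str.isIn] at hx
            simp [List.filter_cons, hx, ihx, List.any_cons]
      exact key (m :: ms)

-- A's accumulated list, after the two loop-shape rewrites, is a flatMap of filters.
theorem pv_present_eq (folders : List String) :
    folders.foldl (fun acc folder =>
      (["bin", "lib", "ctl"] : List String).foldl (fun acc2 req =>
        if PySem.Str.isIn req folder then acc2 ++ [req] else acc2) acc) [] =
    folders.flatMap (fun folder =>
      (["bin", "lib", "ctl"] : List String).filter (fun req => PySem.Str.isIn req folder)) := by
  have h : ∀ (acc : List String) (folder : String),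
      (["bin", "lib", "ctl"] : List String).foldl (fun acc2 req =>
        if PySem.Str.isIn req folder then acc2 ++ [req] else acc2) acc =
      acc ++ (["bin", "lib", "ctl"] : List String).filter (fun req => PySem.Str.isIn req folder) := by
    intro acc folder
    exact PySem.List.foldl_append_if_eq_filter _ _ _
  calc folders.foldl (fun acc folder =>
        (["bin", "lib", "ctl"] : List String).foldl (fun acc2 req =>
          if PySem.Str.isIn req folder then acc2 ++ [req] else acc2) acc) []
      = folders.foldl (fun acc folder =>
          acc ++ (["bin", "lib", "ctl"] : List String).filter
            (fun req => PySem.Str.isIn req folder)) [] := by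
        apply PySem.List.foldl_congr_mem
        intro acc folder _
        exact h acc folder
    _ = _ := by
        simpa using PySem.List.foldl_append_eq_flatMap
          (fun folder => (["bin", "lib", "ctl"] : List String).filter
            (fun req => PySem.Str.isIn req folder)) folders ([] : List String)

-- The core count-vs-existence fact, for an arbitrary folder list.
theorem pv_key (folders : List String) :
    decide (3 ≤ (PySem.Set.ofList
      (folders.foldl (fun acc folder =>
        (["bin", "lib", "ctl"] : List String).foldl (fun acc2 req =>
          if PySem.Str.isIn req folder then acc2 ++ [req] else acc2) acc) [])).length) =
    (["bin", "lib", "ctl"] : List String).all (fun req =>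
      folders.any (fun folder => PySem.Str.isIn req folder)) := by
  rw [pv_present_eq]
  set P := folders.flatMap (fun folder =>
    (["bin", "lib", "ctl"] : List String).filter (fun req => PySem.Str.isIn req folder)) with hP
  have hmem : ∀ x : String, x ∈ P ↔
      x ∈ (["bin", "lib", "ctl"] : List String) ∧
      ∃ f ∈ folders, PySem.Str.isIn x f = true := by
    intro x
    simp only [hP, List.mem_flatMap, List.mem_filter]
    tauto
  set D := PySem.Set.ofList P with hD
  have hDnd : D.Nodup := PySem.Set.nodup_ofList P
  have hDmem : ∀ x : String, x ∈ D ↔ x ∈ P := fun x => PySem.Set.mem_ofList P x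
  have hlen : D.length = D.toFinset.card := (List.toFinset_card_of_nodup hDnd).symm
  have hsub : D.toFinset ⊆ ({"bin", "lib", "ctl"} : Finset String) := by
    intro x hx
    rw [List.mem_toFinset] at hx
    have := ((hmem x).mp ((hDmem x).mp hx)).1
    simp only [List.mem_cons] at this
    simpa using this
  by_cases hall : ∀ req ∈ (["bin", "lib", "ctl"] : List String),
      ∃ f ∈ folders, PySem.Str.isIn req f = true
  · have hge : 3 ≤ D.length := by
      rw [hlen]
      have hsup : ({"bin", "lib", "ctl"} : Finset String) ⊆ D.toFinset := by
        intro x hx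
        rw [List.mem_toFinset, hDmem, hmem]
        have hx' : x ∈ (["bin", "lib", "ctl"] : List String) := by
          simp only [Finset.mem_insert, Finset.mem_singleton] at hx
          simpa using hx
        exact ⟨hx', hall x hx'⟩
      have := Finset.card_le_card hsup
      simpa using this
    rw [decide_eq_true hge]
    symm
    rw [List.all_eq_true]
    intro req hreq
    rw [List.any_eq_true]
    exact hall req hreq
  · have hlt : D.length < 3 := by
      rw [hlen]
      have hne : D.toFinset ≠ ({"bin", "lib", "ctl"} : Finset String) := by
        intro heq
        apply hall
        intro req hreq
        have hreqF : req ∈ ({"bin", "lib", "ctl"} : Finset String) := by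
          simp only [Finset.mem_insert, Finset.mem_singleton]
          simpa using hreq
        rw [← heq, List.mem_toFinset, hDmem, hmem] at hreqF
        exact hreqF.2
      have := Finset.card_lt_card (lt_of_le_of_ne hsub hne)
      simpa using this
    have hnot : ¬ 3 ≤ D.length := by omega
    rw [decide_eq_false hnot]
    rcases hb : (["bin", "lib", "ctl"] : List String).all (fun req =>
        folders.any fun folder => PySem.Str.isIn req folder) with _ | _
    · rfl
    · exfalso
      apply hall
      intro req hreq
      rw [List.all_eq_true] at hb
      have := hb req hreq
      rw [List.any_eq_true] at this
      exact this

-- ===== VERDICT (by name: the statement is the Claim_ definition above) =====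
theorem verifier_structure_unix_py_spec : Claim_equal_verifier_structure_unix_py := by
  intro structure_ _
  unfold Spec_verifier_structure_unix_py verifier_structure_unix_py verifier_structure_unix_py_alt
  rw [pvGo_eq_all_any]
  exact pv_key _
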